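-- pv_equiv track=rewrite | github.com/merdekasiberlab/xsscanner | sanitization_analyzer.py | mutate_payload_by_sanitizer
-- ===== SOURCE A (Python) =====
-- from typing import Dict, Tuple, List
--
-- def _encode_char_for_bypass(ch: str, status: str) -> str:
--     """
--     Strategi encoding deterministik per karakter ‘filtered’.
--     Tujuan: kompatibel lintas konteks umum HTML/attr tanpa over-encoding.
--     """
--     # preferensi: numeric HEX untuk tanda sudut & kutip (stabil di banyak parser)
--     if ch == "<":
--         return "&#x3c;"
--     if ch == ">":
--         return "&#x3e;"
--     if ch == '"':
--         return "&#x22;"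
--     if ch == "'":
--         return "&#x27;"
--     if ch == "&":
--         return "&amp;"
--     if ch == "/":
--         return "&#x2f;"
--
--     # fallback: numeric decimal
--     return f"&#{ord(ch)};"
--
-- def mutate_payload_by_sanitizer(payload: str, sanitizer_map: Dict[str, str]) -> str:
--     """
--     Encode HANYA karakter dengan status 'filtered' (sekali, deterministik).
--     Hindari chaining encode (entity → percent → unicode) seperti versi lama.
--     """
--     # bangun string per karakter agar tidak double-replace
--     out_chars: List[str] = []
--     for ch in payload:
--         status = sanitizer_map.get(ch, "reflected")
--         if status == "filtered":
--             out_chars.append(_encode_char_for_bypass(ch, status))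
--         else:
--             out_chars.append(ch)
--     return "".join(out_chars)
-- ===== SOURCE B (Python) =====
-- def _encode_char_for_bypass(ch: str, status: str) -> str:
--     if ch == "<":
--         return "&#x3c;"
--     if ch == ">":
--         return "&#x3e;"
--     if ch == '"':
--         return "&#x22;"
--     if ch == "'":
--         return "&#x27;"
--     if ch == "&":
--         return "&amp;"
--     if ch == "/":
--         return "&#x2f;"
--     return f"&#{ord(ch)};"
--
-- def mutate_payload_by_sanitizer(payload: str, sanitizer_map) -> str:
--     # build a translation table once, then translate the payload in one pass
--     table = {
--         ord(ch): _encode_char_for_bypass(ch, "filtered")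
--         for ch, status in sanitizer_map.items()
--         if len(ch) == 1 and status == "filtered"
--     }
--     return payload.translate(table)
-- ===== Notes on version B (the rewrite author's own statement) =====
-- stated objective: faster
-- what changed: Replaces A's per-character Python loop with dict.get and a branch by building a translation table once from the sanitizer map (single-char 'filtered' keys only) and returning payload.translate(table) in one pass.
import Mathlib
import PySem

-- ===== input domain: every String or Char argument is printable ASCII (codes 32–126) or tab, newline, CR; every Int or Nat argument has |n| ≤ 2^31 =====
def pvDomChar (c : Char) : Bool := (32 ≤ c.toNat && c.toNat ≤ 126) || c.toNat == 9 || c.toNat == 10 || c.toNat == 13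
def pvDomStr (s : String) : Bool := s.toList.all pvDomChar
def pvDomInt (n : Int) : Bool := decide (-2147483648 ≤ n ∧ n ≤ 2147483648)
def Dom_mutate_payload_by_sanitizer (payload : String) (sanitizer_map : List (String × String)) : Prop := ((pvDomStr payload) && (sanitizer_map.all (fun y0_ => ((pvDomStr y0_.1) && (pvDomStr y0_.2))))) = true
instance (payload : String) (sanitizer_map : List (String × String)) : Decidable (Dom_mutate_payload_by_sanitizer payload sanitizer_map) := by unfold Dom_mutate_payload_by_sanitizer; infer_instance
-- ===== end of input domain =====

-- B replaces A's per-character dict.get loop by a precomputed translation table consumed by str.translate (idiomatic; same cost).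
-- ===== PORT A =====
-- shared module helper _encode_char_for_bypass (ported on List Char; exact for the ASCII domain)
def pvEncodeChar (ch : Char) : List Char :=
  if ch = '<' then "&#x3c;".toList
  else if ch = '>' then "&#x3e;".toList
  else if ch = '"' then "&#x22;".toList
  else if ch = '\'' then "&#x27;".toList
  else if ch = '&' then "&amp;".toList
  else if ch = '/' then "&#x2f;".toList
  else '&' :: '#' :: (PySem.Int.toChars (ch.toNat : Int) ++ [';'])

def mutate_payload_by_sanitizer (payload : String) (sanitizer_map : List (String × String)) : String :=
  -- out_chars accumulates one piece per payload character; ''.join = flatten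
  let out_chars : List (List Char) :=
    payload.toList.foldl (fun acc ch =>
      let status := PySem.Dict.getD (PySem.Dict.mk sanitizer_map) (String.ofList [ch]) "reflected"
      acc ++ [if status = "filtered" then pvEncodeChar ch else [ch]]) []
  String.ofList out_chars.flatten

-- ===== PORT B =====
-- the dict-comprehension building B's translation table
def pvTableStep (t : PySem.Dict Char (List Char)) (p : String × String) : PySem.Dict Char (List Char) :=
  if p.1.toList.length = 1 ∧ p.2 = "filtered"
  then t.insert (p.1.toList.headD ' ') (pvEncodeChar (p.1.toList.headD ' '))
  else t

def mutate_payload_by_sanitizer_alt (payload : String) (sanitizer_map : List (String × String)) : String :=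
  let table : PySem.Dict Char (List Char) :=
    sanitizer_map.foldl pvTableStep PySem.Dict.empty
  -- str.translate: chars with a table entry are replaced, others pass through
  String.ofList (payload.toList.map (fun ch => (table.get? ch).getD [ch])).flatten

-- ===== PRECONDITION & SPEC =====
-- Pre_ excludes association lists with duplicate keys, which cannot arise from a Python dict argument;
-- there A's first-match lookup and B's table (last write wins) are both accidental.
def Pre_mutate_payload_by_sanitizer (payload : String) (sanitizer_map : List (String × String)) : Prop :=
  (sanitizer_map.map Prod.fst).Nodup
instance (payload : String) (sanitizer_map : List (String × String)) : Decidable (Pre_mutate_payload_by_sanitizer payload sanitizer_map) := by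
  unfold Pre_mutate_payload_by_sanitizer; infer_instance
def pvWitness_mutate_payload_by_sanitizer : String × (List (String × String)) :=
  ("a<b/c", [("<", "filtered"), ("/", "reflected"), ("b", "filtered")])

def Spec_mutate_payload_by_sanitizer (payload : String) (sanitizer_map : List (String × String)) (out : String) : Prop := out = mutate_payload_by_sanitizer_alt payload sanitizer_map
instance (payload : String) (sanitizer_map : List (String × String)) (out : String) : Decidable (Spec_mutate_payload_by_sanitizer payload sanitizer_map out) := by unfold Spec_mutate_payload_by_sanitizer; infer_instance

-- ===== CLAIM (what is proved, stated in full; the proofs are below) =====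
def Claim_equal_mutate_payload_by_sanitizer : Prop := ∀ (payload : String) (sanitizer_map : List (String × String)), Dom_mutate_payload_by_sanitizer payload sanitizer_map → Pre_mutate_payload_by_sanitizer payload sanitizer_map → Spec_mutate_payload_by_sanitizer payload sanitizer_map (mutate_payload_by_sanitizer payload sanitizer_map)

-- ===== LEMMAS AND PROOFS =====

-- folding pvTableStep over pairs whose keys never equal String.ofList [ch] leaves get? ch unchanged
theorem pv_get?_foldl_not_mem (sm : List (String × String)) (t : PySem.Dict Char (List Char)) (ch : Char)
    (h : String.ofList [ch] ∉ sm.map Prod.fst) :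
    (sm.foldl pvTableStep t).get? ch = t.get? ch := by
  induction sm generalizing t with
  | nil => rfl
  | cons p rest ih =>
    simp only [List.map_cons, List.mem_cons, not_or] at h
    simp only [List.foldl_cons]
    rw [ih _ h.2]
    unfold pvTableStep
    split
    · rename_i hc
      rw [PySem.Dict.get?_insert_of_ne]
      intro he
      exact h.1 (by
        have hl : p.1.toList = [p.1.toList.headD ' '] := by
          match hx : p.1.toList, hc.1 with
          | [a], _ => rfl
        have := congrArg String.ofList hl
        rw [String.ofList_toList] at this
        rw [this, he])
    · rfl

-- with unique keys, the table's entry at ch is exactly "first match is filtered"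
theorem pv_get?_foldl (sm : List (String × String)) (t : PySem.Dict Char (List Char)) (ch : Char)
    (hnd : (sm.map Prod.fst).Nodup) (ht : t.get? ch = none) :
    (sm.foldl pvTableStep t).get? ch =
      (if PySem.Dict.getD (PySem.Dict.mk sm) (String.ofList [ch]) "reflected" = "filtered"
       then some (pvEncodeChar ch) else none) := by
  induction sm generalizing t with
  | nil =>
    rw [List.foldl_nil, ht]
    simp [PySem.Dict.getD, PySem.Dict.get?]
  | cons p rest ih =>
    obtain ⟨hp, v⟩ := p
    simp only [List.map_cons, List.nodup_cons] at hnd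
    simp only [List.foldl_cons]
    by_cases hk : hp = String.ofList [ch]
    · subst hk
      have hget : PySem.Dict.getD (PySem.Dict.mk ((String.ofList [ch], v) :: rest)) (String.ofList [ch]) "reflected" = v := by
        rw [PySem.Dict.getD_eq_get?_getD, PySem.Dict.get?_mk_cons]
        simp
      rw [hget]
      by_cases hv : v = "filtered"
      · subst hv
        have hstep : pvTableStep t (String.ofList [ch], "filtered") = t.insert ch (pvEncodeChar ch) := by
          simp [pvTableStep]
        rw [hstep, pv_get?_foldl_not_mem rest _ ch hnd.1, PySem.Dict.get?_insert_self]
        simp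
      · have hstep : pvTableStep t (String.ofList [ch], v) = t := by
          simp [pvTableStep, hv]
        rw [hstep, pv_get?_foldl_not_mem rest _ ch hnd.1, ht, if_neg hv]
    · have hget : PySem.Dict.getD (PySem.Dict.mk ((hp, v) :: rest)) (String.ofList [ch]) "reflected"
          = PySem.Dict.getD (PySem.Dict.mk rest) (String.ofList [ch]) "reflected" := by
        rw [PySem.Dict.getD_eq_get?_getD, PySem.Dict.get?_mk_cons, if_neg (by simpa using hk),
          ← PySem.Dict.getD_eq_get?_getD]
      rw [hget]
      by_cases hc : hp.toList.length = 1 ∧ v = "filtered"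
      · have hstep : pvTableStep t (hp, v)
            = t.insert (hp.toList.headD ' ') (pvEncodeChar (hp.toList.headD ' ')) := by
          simp only [pvTableStep]; exact if_pos hc
        rw [hstep]
        apply ih _ hnd.2
        rw [PySem.Dict.get?_insert_of_ne, ht]
        intro he
        apply hk
        have hl : hp.toList = [hp.toList.headD ' '] := by
          match hx : hp.toList, hc.1 with
          | [a], _ => rfl
        have h2 := congrArg String.ofList hl
        rw [String.ofList_toList] at h2
        rw [h2, he]
      · have hstep : pvTableStep t (hp, v) = t := by
          simp only [pvTableStep]; exact if_neg hc
        rw [hstep]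
        exact ih _ hnd.2 ht

-- ===== VERDICT (by name: the statement is the Claim_ definition above) =====
theorem mutate_payload_by_sanitizer_spec : Claim_equal_mutate_payload_by_sanitizer := by
  intro payload sm _ hpre
  unfold Spec_mutate_payload_by_sanitizer mutate_payload_by_sanitizer mutate_payload_by_sanitizer_alt
  simp only [PySem.List.foldl_append_singleton_eq_map, List.nil_append]
  congr 1
  apply congrArg
  apply List.map_congr_left
  intro ch _
  rw [pv_get?_foldl sm PySem.Dict.empty ch hpre (PySem.Dict.get?_empty ch)]
  split <;> rfl
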